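-- pv_equiv track=rewrite | github.com/josephwidjaja100/foobar-solutions | p9.py | solution
-- ===== SOURCE A (Python) =====
-- from math import factorial, pow
--
-- def gcd(a, b):
--     if(b == 0):
--         return a
--     return gcd(b, a % b);
--
-- def partition(n, x=1):
--     yield [n]
--     for x in range(x, n//2+1):
--         for y in partition(n-x, x):
--             yield [x] + y
--
-- def expsum(rowp, colp):
--     amt = 0
--     for a in rowp:
--         for b in colp:
--             amt += gcd(a, b)
--     return amt
--
-- def conjugate(c, n):
--     res = factorial(n)
--     d = {}
--     for val in c:
--         if(not(val in d)):
--             d[val] = 1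
--         else:
--             d[val] += 1
--     for a, b in d.items():
--         res //= (a**b)*factorial(b)
--     return res
--
-- def solution(w, h, s):
--     div = factorial(w) * factorial(h)
--
--     res = 0
--     for r in partition(w):
--         for c in partition(h):
--             exp = expsum(r, c)
--             x = conjugate(r, w) * conjugate(c, h)
--             res += x*(s**exp)
--
--     return str(int(res//div))
-- ===== SOURCE B (Python) =====
-- from math import factorial, gcd
--
--
-- def _phi(d):
--     # Euler's totient, by definition
--     return sum(1 for k in range(1, d + 1) if gcd(k, d) == 1)
--
--
-- def _parts_desc(n, m):
--     # all partitions of n as nonincreasing lists of parts <= m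
--     if n == 0:
--         return [[]]
--     out = []
--     for k in range(min(n, m), 0, -1):
--         for rest in _parts_desc(n - k, k):
--             out.append([k] + rest)
--     return out
--
--
-- def _class_size(p, n):
--     # conjugacy-class size of S_n for the sorted cycle type p, via run-length scan
--     res = factorial(n)
--     while p:
--         c = p.count(p[0])
--         res //= p[0] ** c * factorial(c)
--         p = p[c:]
--     return res
--
--
-- def _cross(r, c, phis):
--     # cycles of the induced grid permutation:
--     # sum_d phi(d) * |{a in r : d|a}| * |{b in c : d|b}|
--     return sum(ph
--                * sum(1 for a in r if a % d == 0)
--                * sum(1 for b in c if b % d == 0)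
--                for d, ph in phis)
--
--
-- def solution(w, h, s):
--     phis = [(d, _phi(d)) for d in range(1, min(w, h) + 1)]
--     total = 0
--     for r in _parts_desc(w, w):
--         wr = _class_size(r, w)
--         for c in _parts_desc(h, h):
--             total += wr * _class_size(c, h) * s ** _cross(r, c, phis)
--     return str(total // (factorial(w) * factorial(h)))
-- ===== Notes on version B (the rewrite author's own statement) =====
-- stated objective: alternative
-- what changed: B enumerates partitions largest-part-first by a different recursion (parts bounded above, base n=0), reads the conjugacy-class size off the sorted cycle type with a run-length scan instead of a multiplicity dict, and computes the exponent number-theoretically as sum_d phi(d)*|{a in r: d|a}|*|{b in c: d|b}| (Euler totient) instead of a gcd double loop over all cycle pairs.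
import Mathlib
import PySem

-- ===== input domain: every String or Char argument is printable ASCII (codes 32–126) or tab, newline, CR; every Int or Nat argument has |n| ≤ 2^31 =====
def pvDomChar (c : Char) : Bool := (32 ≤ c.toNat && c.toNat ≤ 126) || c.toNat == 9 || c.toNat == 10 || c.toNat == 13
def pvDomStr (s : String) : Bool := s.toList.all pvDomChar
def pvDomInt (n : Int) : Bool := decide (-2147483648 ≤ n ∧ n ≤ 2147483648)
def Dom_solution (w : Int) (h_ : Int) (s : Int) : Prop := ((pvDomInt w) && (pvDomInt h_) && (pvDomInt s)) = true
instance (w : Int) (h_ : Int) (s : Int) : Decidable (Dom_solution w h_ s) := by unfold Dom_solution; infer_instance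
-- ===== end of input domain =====

-- B restructures the Burnside count: partitions are generated largest-part-first by a different
-- recursion (parts bounded above, base n = 0), the class size is read off the sorted list by a
-- run-length scan instead of a dict of multiplicities, and the cycle count of each permutation
-- pair is computed number-theoretically as Σ_d φ(d)·|{a∈r : d|a}|·|{b∈c : d|b}| instead of a
-- gcd double loop over all cycle pairs. Objective: alternative (not faster).

-- ===== PORT A =====

-- Python's recursive gcd; fuel makes the recursion total, |b|+1 steps always suffice
def pygcdFuel : Nat → Int → Int → Int
  | 0, a, _ => a
  | f + 1, a, b => if b = 0 then a else pygcdFuel f b (PySem.Int.mod a b)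

def pygcd (a b : Int) : Int := pygcdFuel (b.natAbs + 1) a b

-- generator `partition(n, x)` as the list of yielded partitions; fuel bounds the recursion depth
-- (n.toNat + 1 at the call site is always enough since every part removed is ≥ 1)
def partitionA : Nat → Int → Int → List (List Int)
  | 0, n, _ => [[n]]
  | f + 1, n, x =>
    [n] :: (PySem.List.pyRange x (PySem.Int.floordiv n 2 + 1) 1).flatMap
      (fun k => (partitionA f (n - k) k).map (fun y => k :: y))

def expsumA (rowp colp : List Int) : Int :=
  rowp.foldl (fun amt a => colp.foldl (fun amt b => amt + pygcd a b) amt) 0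

-- math.factorial n = n.toNat.factorial, exact for n ≥ 0 (Pre_ gives 1 ≤ n at both call sites)
def conjugateA (c : List Int) (n : Int) : Int :=
  let res : Int := (n.toNat.factorial : Int)
  let d : PySem.Dict Int Int :=
    c.foldl (fun d val =>
      if d.contains val = false then d.insert val 1 else d.insert val (d.getD val 0 + 1))
      PySem.Dict.empty
  d.items.foldl (fun res p => PySem.Int.floordiv res (p.1 ^ p.2.toNat * (p.2.toNat.factorial : Int))) res

def solution (w : Int) (h_ : Int) (s : Int) : String :=
  let div : Int := (w.toNat.factorial : Int) * (h_.toNat.factorial : Int)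
  let res : Int :=
    (partitionA (w.toNat + 1) w 1).foldl (fun res r =>
      (partitionA (h_.toNat + 1) h_ 1).foldl (fun res c =>
        let exp := expsumA r c
        let x := conjugateA r w * conjugateA c h_
        res + x * s ^ exp.toNat) res) 0
  PySem.Int.toStr (PySem.Int.floordiv res div)

-- ===== PORT B =====

-- _phi(d): sum over k in range(1, d+1) of 1 when math.gcd(k, d) == 1
def phiB (d : Int) : Int :=
  ((PySem.List.pyRange 1 (d + 1) 1).map
    (fun k => if (Int.gcd k d : Int) = 1 then (1 : Int) else 0)).sum

-- _parts_desc(n, m); fuel n.toNat + 1 at the call sites (each recursion removes a part ≥ 1)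
def partsDesc : Nat → Int → Int → List (List Int)
  | 0, n, _ => if n = 0 then [[]] else []
  | f + 1, n, m =>
    if n = 0 then [[]] else
    (PySem.List.pyRange (min n m) 0 (-1)).flatMap
      (fun k => (partsDesc f (n - k) k).map (fun rest => k :: rest))

-- while p: c = p.count(p[0]); res //= p[0]**c * factorial(c); p = p[c:]   (fuel = p.length)
def classSizeAux : Nat → List Int → Int → Int
  | 0, _, res => res
  | f + 1, p, res =>
    match p with
    | [] => res
    | a :: _ =>
      let c := p.count a
      classSizeAux f (PySem.List.slice p (some (c : Int)) none)
        (PySem.Int.floordiv res (a ^ c * (c.factorial : Int)))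

def classSize (p : List Int) (n : Int) : Int :=
  classSizeAux p.length p (n.toNat.factorial : Int)

def crossB (r c : List Int) (phis : List (Int × Int)) : Int :=
  (phis.map (fun dp =>
    dp.2 * ((r.map (fun a => if PySem.Int.mod a dp.1 = 0 then (1 : Int) else 0)).sum)
         * ((c.map (fun b => if PySem.Int.mod b dp.1 = 0 then (1 : Int) else 0)).sum))).sum

def solution_alt (w : Int) (h_ : Int) (s : Int) : String :=
  let phis : List (Int × Int) :=
    (PySem.List.pyRange 1 (min w h_ + 1) 1).map (fun d => (d, phiB d))
  let total : Int :=
    (partsDesc (w.toNat + 1) w w).foldl (fun total r =>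
      let wr := classSize r w
      (partsDesc (h_.toNat + 1) h_ h_).foldl (fun total c =>
        total + wr * classSize c h_ * s ^ (crossB r c phis).toNat) total) 0
  PySem.Int.toStr (PySem.Int.floordiv total ((w.toNat.factorial : Int) * (h_.toNat.factorial : Int)))

-- ===== PRECONDITION & SPEC =====

-- Pre_ excludes exactly the inputs where Python A raises: w = 0 or h = 0 hit a division by zero
-- (0**1 in conjugate) and negative w or h make factorial raise ValueError.
def Pre_solution (w : Int) (h_ : Int) (s : Int) : Prop := 1 ≤ w ∧ 1 ≤ h_
instance (w : Int) (h_ : Int) (s : Int) : Decidable (Pre_solution w h_ s) := by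
  unfold Pre_solution; infer_instance

def pvWitness_solution : Int × Int × Int := (2, 2, 2)

def Spec_solution (w : Int) (h_ : Int) (s : Int) (out : String) : Prop := out = solution_alt w h_ s
instance (w : Int) (h_ : Int) (s : Int) (out : String) : Decidable (Spec_solution w h_ s out) := by
  unfold Spec_solution; infer_instance

-- ===== CLAIM (what is proved, stated in full; the proofs are below) =====
def Claim_equal_solution : Prop := ∀ (w : Int) (h_ : Int) (s : Int), Dom_solution w h_ s → Pre_solution w h_ s → Spec_solution w h_ s (solution w h_ s)

-- ===== LEMMAS AND PROOFS =====

-- The common mathematical value both programs compute, phrased on multisets (cycle types).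
def toMS (l : List Int) : Multiset Int := (l : Multiset Int)

def msProd (S : Multiset Int) : Int :=
  S.toFinset.prod (fun a => a ^ (S.count a) * ((S.count a).factorial : Int))

def Gm (S : Multiset Int) (n : Int) : Int :=
  PySem.Int.floordiv (n.toNat.factorial : Int) (msProd S)

def cntDvd (S : Multiset Int) (d : Int) : Int :=
  (S.countP (fun a => PySem.Int.mod a d = 0) : Int)

def Em (S T : Multiset Int) (m : Int) : Int :=
  ((PySem.List.pyRange 1 (m + 1) 1).map
    (fun d => (Nat.totient d.toNat : Int) * cntDvd S d * cntDvd T d)).sum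

def Fm (w h s : Int) (S T : Multiset Int) : Int :=
  Gm S w * Gm T h * s ^ (Em S T (min w h)).toNat

lemma list_sum_swap (r : List Int) (D : List Int) (g : Int → Int → Int) :
    (r.map (fun a => (D.map (g a)).sum)).sum = (D.map (fun d => (r.map (fun a => g a d)).sum)).sum := by
  induction r with
  | nil => simp
  | cons a t ih =>
    simp only [List.map_cons, List.sum_cons, ih, ← List.sum_map_add]

lemma pymod_natAbs_lt (a b : Int) (h : b ≠ 0) : (PySem.Int.mod a b).natAbs < b.natAbs := by
  have h0 : 0 ≤ a % b := Int.emod_nonneg a h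
  have h1 : a % b < (b.natAbs : Int) := by
    rcases lt_or_gt_of_ne h with hneg | hpos
    · have := Int.emod_lt_of_pos a (show (0:Int) < -b by omega)
      rw [Int.emod_neg] at this; omega
    · have := Int.emod_lt_of_pos a hpos; omega
  have hf : Int.fmod a b = a % b + if 0 ≤ b ∨ b ∣ a then 0 else b := Int.fmod_eq_emod
  show (Int.fmod a b).natAbs < b.natAbs
  split_ifs at hf with hcond
  · rcases hcond with hb0 | hdvd
    · omega
    · have : a % b = 0 := Int.emod_eq_zero_of_dvd hdvd
      omega
  · push Not at hcond
    omega

lemma pygcdFuel_congr : ∀ (f g : Nat) (a b : Int), b.natAbs < f → b.natAbs < g →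
    pygcdFuel f a b = pygcdFuel g a b := by
  intro f
  induction f with
  | zero => intro g a b hf; omega
  | succ f ih =>
    intro g a b hf hg
    cases g with
    | zero => omega
    | succ g =>
      simp only [pygcdFuel]
      by_cases hb : b = 0
      · simp [hb]
      · simp only [hb, if_false]
        exact ih g b _ (by have := pymod_natAbs_lt a b hb; omega)
          (by have := pymod_natAbs_lt a b hb; omega)

lemma pygcd_eq_gcd (a b : Int) (ha : 0 ≤ a) (hb : 0 ≤ b) : pygcd a b = (Int.gcd a b : Int) := by
  induction hn : b.natAbs using Nat.strong_induction_on generalizing a b with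
  | _ n ih =>
  by_cases hb0 : b = 0
  · subst hb0
    have h1 : pygcd a 0 = a := rfl
    rw [h1, Int.gcd_zero_right]
    exact (Int.natAbs_of_nonneg ha).symm
  · have hbpos : 0 < b := lt_of_le_of_ne hb (Ne.symm hb0)
    have hstep : pygcd a b = pygcdFuel b.natAbs b (PySem.Int.mod a b) := by
      simp [pygcd, pygcdFuel, hb0]
    rw [PySem.Int.mod_eq_emod_of_pos hbpos] at hstep
    set r := a % b with hr
    have hr0 : 0 ≤ r := Int.emod_nonneg a hb0
    have hrlt : r < b := Int.emod_lt_of_pos a hbpos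
    have hrn : r.natAbs < b.natAbs := by omega
    have hcg : pygcdFuel b.natAbs b r = pygcd b r := pygcdFuel_congr _ _ b r (by omega) (by omega)
    rw [hstep, hcg, ih r.natAbs (by omega) b r hb hr0 rfl]
    congr 1
    have hmod : a.natAbs % b.natAbs = r.natAbs := by
      have hcast : ((a.natAbs % b.natAbs : Nat) : Int) = r := by
        push_cast
        rw [abs_of_nonneg ha, abs_of_nonneg hb]
      omega
    unfold Int.gcd
    rw [← hmod, Nat.gcd_comm a.natAbs b.natAbs, Nat.gcd_rec b.natAbs a.natAbs]
    exact Nat.gcd_comm _ _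

lemma foldl_floordiv_prod {α : Type} (ps : List α) (g : α → Int) (N : Int)
    (hpos : ∀ p ∈ ps, 0 < g p) :
    ps.foldl (fun r p => PySem.Int.floordiv r (g p)) N = PySem.Int.floordiv N ((ps.map g).prod) := by
  induction ps generalizing N with
  | nil => simp [PySem.Int.floordiv, Int.fdiv_one]
  | cons p tl ih =>
    have hp : 0 < g p := hpos p List.mem_cons_self
    have htl : 0 < (tl.map g).prod := by
      apply List.prod_pos
      intro a ha
      rcases List.mem_map.mp ha with ⟨b, hb, rfl⟩
      exact hpos b (List.mem_cons_of_mem _ hb)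
    simp only [List.foldl_cons, List.map_cons, List.prod_cons]
    rw [ih _ (fun q hq => hpos q (List.mem_cons_of_mem _ hq))]
    rw [PySem.Int.floordiv_eq_ediv_of_pos hp, PySem.Int.floordiv_eq_ediv_of_pos htl,
        PySem.Int.floordiv_eq_ediv_of_pos (mul_pos hp htl)]
    exact Int.ediv_ediv_of_nonneg hp.le

lemma conjA_eq (r : List Int) (n : Int) (hr : ∀ a ∈ r, 1 ≤ a) :
    conjugateA r n = Gm (↑r) n := by
  have hfun : (fun (d : PySem.Dict Int Int) (val : Int) =>
      if d.contains val = false then d.insert val 1 else d.insert val (d.getD val 0 + 1)) =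
      (fun d val => d.insert val (d.getD val 0 + 1)) := by
    funext d val
    by_cases h : d.contains val = true
    · simp [h]
    · have h' : d.contains val = false := by simpa using h
      rw [if_pos h', PySem.Dict.getD_of_not_contains d 0 h']
      norm_num
  have hpos : ∀ p ∈ (PySem.Dict.counter r).items,
      0 < p.1 ^ p.2.toNat * ((p.2.toNat.factorial : Nat) : Int) := by
    intro p hp
    rw [PySem.Dict.items_counter] at hp
    rcases List.mem_map.mp hp with ⟨k, hk, rfl⟩
    have hk1 : 1 ≤ k := hr k ((PySem.Set.mem_ofList r k).mp hk)
    exact mul_pos (pow_pos (by omega) _) (by exact_mod_cast Nat.factorial_pos _)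
  unfold conjugateA
  rw [hfun, PySem.Dict.foldl_insert_getD_add_one_eq_counter,
      foldl_floordiv_prod _ _ _ hpos]
  unfold Gm msProd
  congr 1
  rw [PySem.Dict.items_counter, List.map_map]
  have hnd : (PySem.Set.ofList r).Nodup := PySem.Set.nodup_ofList r
  have htf : (PySem.Set.ofList r).toFinset = (↑r : Multiset Int).toFinset := by
    apply Finset.ext; intro a
    simp [List.mem_toFinset, PySem.Set.mem_ofList, Multiset.mem_coe]
  rw [← List.prod_toFinset _ hnd, htf]
  apply Finset.prod_congr rfl
  intro a _
  simp [Multiset.coe_count]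

lemma sum_map_range_eq (n : Nat) (f : Nat → Int) :
    ((List.range n).map f).sum = ∑ k ∈ Finset.range n, f k := rfl

lemma gcd_eq_totient_sum (a b m : Int) (ha : 1 ≤ a) (hb : 1 ≤ b) (ham : a ≤ m ∨ b ≤ m) :
    (Int.gcd a b : Int) =
      ((PySem.List.pyRange 1 (m + 1) 1).map
        (fun d => if PySem.Int.mod a d = 0 ∧ PySem.Int.mod b d = 0
                  then (Nat.totient d.toNat : Int) else 0)).sum := by
  have hm : 1 ≤ m := by omega
  set g : Nat := Int.gcd a b with hg
  have hga : (g : Int) ∣ a := Int.gcd_dvd_left a b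
  have hgb : (g : Int) ∣ b := Int.gcd_dvd_right a b
  have hg1 : 1 ≤ g := by
    rcases Nat.eq_zero_or_pos g with h0 | h1
    · exfalso; rw [hg] at h0; have := Int.gcd_eq_zero_iff.mp h0; omega
    · omega
  have hgm : (g : Int) ≤ m := by
    rcases ham with h | h
    · exact le_trans (Int.le_of_dvd (by omega) hga) h
    · exact le_trans (Int.le_of_dvd (by omega) hgb) h
  set F : Nat → Int := fun d => if d ∣ g then (Nat.totient d : Int) else 0 with hF
  have hcond : ∀ d : Int, 1 ≤ d →
      ((PySem.Int.mod a d = 0 ∧ PySem.Int.mod b d = 0) ↔ d.toNat ∣ g) := by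
    intro d hd
    rw [PySem.Int.mod_eq_zero_iff_dvd, PySem.Int.mod_eq_zero_iff_dvd]
    have hdd : d = (d.toNat : Int) := by omega
    constructor
    · rintro ⟨h1, h2⟩
      rw [hdd] at h1 h2
      exact Int.dvd_gcd h1 h2
    · intro hdg
      have : d ∣ (g : Int) := by rw [hdd]; exact_mod_cast hdg
      exact ⟨this.trans hga, this.trans hgb⟩
  rw [PySem.List.pyRange_one, List.map_map, sum_map_range_eq]
  have hmt : (m + 1 - 1).toNat = m.toNat := by omega
  rw [hmt]
  have hstep : ∀ k ∈ Finset.range m.toNat,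
      ((fun d => if PySem.Int.mod a d = 0 ∧ PySem.Int.mod b d = 0
                  then (Nat.totient d.toNat : Int) else 0) ∘ fun k : Nat => (1 : Int) + k) k
      = F (k + 1) := by
    intro k _
    simp only [Function.comp_apply, hF]
    rw [if_congr (hcond (1 + (k : Int)) (by omega)) rfl rfl]
    have h1 : ((1 : Int) + (k : Nat)).toNat = k + 1 := by omega
    rw [h1]
  rw [Finset.sum_congr rfl hstep]
  have h0 : F 0 = 0 := by
    rw [hF]; simp only []
    rw [if_neg]; omega
  have key : (∑ k ∈ Finset.range m.toNat, F (k + 1)) = ∑ k ∈ Finset.range (m.toNat + 1), F k := by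
    rw [Finset.sum_range_succ' F m.toNat, h0, add_zero]
  rw [key, hF]
  rw [← Finset.sum_filter]
  have hfil : (Finset.range (m.toNat + 1)).filter (· ∣ g) = g.divisors := by
    apply Finset.ext; intro d
    simp only [Finset.mem_filter, Finset.mem_range, Nat.mem_divisors]
    constructor
    · rintro ⟨_, hdvd⟩; exact ⟨hdvd, by omega⟩
    · rintro ⟨hdvd, _⟩
      have := Nat.le_of_dvd (by omega) hdvd
      exact ⟨by omega, hdvd⟩
  rw [hfil, ← Nat.cast_sum]
  exact_mod_cast (Nat.sum_totient g).symm

lemma sum_ite_count (l : List Int) (q : Int → Prop) [DecidablePred q] :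
    (l.map (fun b => if q b then (1 : Int) else 0)).sum = ((↑l : Multiset Int).countP q : Int) := by
  induction l with
  | nil => simp
  | cons a t ih =>
    simp only [List.map_cons, List.sum_cons, ih, ← Multiset.cons_coe, Multiset.countP_cons]
    split_ifs <;> push_cast <;> ring

lemma expsumA_eq (r c : List Int) (W H : Int)
    (hr : ∀ a ∈ r, 1 ≤ a ∧ a ≤ W) (hc : ∀ b ∈ c, 1 ≤ b ∧ b ≤ H) :
    expsumA r c = Em (↑r) (↑c) (min W H) := by
  set m := min W H with hm
  set D := PySem.List.pyRange 1 (m + 1) 1 with hD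
  -- fold → nested sums
  have hA : expsumA r c = (r.map (fun a => (c.map (fun b => pygcd a b)).sum)).sum := by
    unfold expsumA
    rw [PySem.List.foldl_congr_mem r _ (fun amt a => amt + (c.map (fun b => pygcd a b)).sum) 0
      (by intro acc a _; exact PySem.List.foldl_add c _ acc)]
    rw [PySem.List.foldl_add]
    norm_num
  rw [hA]
  -- pointwise: pygcd = totient sum over D
  have hpt : ∀ a ∈ r, ∀ b ∈ c, pygcd a b =
      (D.map (fun d => if PySem.Int.mod a d = 0 ∧ PySem.Int.mod b d = 0
                  then (Nat.totient d.toNat : Int) else 0)).sum := by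
    intro a ha b hb
    have h1 := hr a ha
    have h2 := hc b hb
    rw [pygcd_eq_gcd a b (by omega) (by omega)]
    exact gcd_eq_totient_sum a b m (by omega) (by omega)
      (by rcases le_total W H with h | h
          · left; omega
          · right; omega)
  have h2 : (r.map (fun a => (c.map (fun b => pygcd a b)).sum)).sum =
      (r.map (fun a => (c.map (fun b =>
        (D.map (fun d => if PySem.Int.mod a d = 0 ∧ PySem.Int.mod b d = 0
                  then (Nat.totient d.toNat : Int) else 0)).sum)).sum)).sum := by
    apply congrArg; apply List.map_congr_left; intro a ha
    apply congrArg; apply List.map_congr_left; intro b hb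
    exact hpt a ha b hb
  rw [h2]
  -- swap b↔d inside each a, then a↔d
  have h3 : ∀ a : Int, (c.map (fun b =>
        (D.map (fun d => if PySem.Int.mod a d = 0 ∧ PySem.Int.mod b d = 0
                  then (Nat.totient d.toNat : Int) else 0)).sum)).sum
      = (D.map (fun d => (c.map (fun b =>
          if PySem.Int.mod a d = 0 ∧ PySem.Int.mod b d = 0
                  then (Nat.totient d.toNat : Int) else 0)).sum)).sum := by
    intro a
    exact list_sum_swap c D _
  have h4 : (r.map (fun a => (c.map (fun b =>
        (D.map (fun d => if PySem.Int.mod a d = 0 ∧ PySem.Int.mod b d = 0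
                  then (Nat.totient d.toNat : Int) else 0)).sum)).sum)).sum
      = (D.map (fun d => (r.map (fun a => (c.map (fun b =>
          if PySem.Int.mod a d = 0 ∧ PySem.Int.mod b d = 0
                  then (Nat.totient d.toNat : Int) else 0)).sum)).sum)).sum := by
    rw [List.map_congr_left (fun a _ => h3 a)]
    exact list_sum_swap r D _
  rw [h4]
  unfold Em
  apply congrArg; apply List.map_congr_left; intro d _
  -- per d: Σ_a Σ_b ite(Pa∧Pb) φ = φ * cnt r * cnt c
  have hsplit : ∀ a b : Int,
      (if PySem.Int.mod a d = 0 ∧ PySem.Int.mod b d = 0 then (Nat.totient d.toNat : Int) else 0)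
      = (if PySem.Int.mod a d = 0 then (1:Int) else 0) * ((Nat.totient d.toNat : Int) *
        (if PySem.Int.mod b d = 0 then (1:Int) else 0)) := by
    intro a b
    by_cases hA : PySem.Int.mod a d = 0 <;> by_cases hB : PySem.Int.mod b d = 0 <;>
      simp only [hA, hB, and_true, true_and, and_false, false_and, if_true, if_false,
        if_pos, if_neg, not_false_iff] <;> ring
  calc (r.map (fun a => (c.map (fun b =>
          if PySem.Int.mod a d = 0 ∧ PySem.Int.mod b d = 0
                  then (Nat.totient d.toNat : Int) else 0)).sum)).sum
      = (r.map (fun a => (if PySem.Int.mod a d = 0 then (1:Int) else 0) *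
          ((Nat.totient d.toNat : Int) * (c.map (fun b =>
            if PySem.Int.mod b d = 0 then (1:Int) else 0)).sum))).sum := by
        apply congrArg; apply List.map_congr_left; intro a _
        rw [List.map_congr_left (fun b _ => hsplit a b), ← List.sum_map_mul_left,
            ← List.sum_map_mul_left]
    _ = (r.map (fun a => if PySem.Int.mod a d = 0 then (1:Int) else 0)).sum *
          ((Nat.totient d.toNat : Int) * (c.map (fun b =>
            if PySem.Int.mod b d = 0 then (1:Int) else 0)).sum) := by
        rw [← List.sum_map_mul_right]
    _ = (Nat.totient d.toNat : Int) * cntDvd (↑r) d * cntDvd (↑c) d := by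
        rw [sum_ite_count r (fun a => PySem.Int.mod a d = 0),
            sum_ite_count c (fun b => PySem.Int.mod b d = 0)]
        unfold cntDvd; ring

lemma phiB_eq (d : Int) (hd : 1 ≤ d) : phiB d = (Nat.totient d.toNat : Int) := by
  set n := d.toNat with hn
  have hdn : d = (n : Int) := by omega
  set F : Nat → Int := fun k => if Nat.gcd k n = 1 then (1 : Int) else 0 with hF
  have hconv : ∀ k : Nat, 1 ≤ k →
      (if (Int.gcd ((1:Int) + ((k-1 : Nat) : Int)) d : Int) = 1 then (1:Int) else 0) = F k := by
    intro k hk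
    have h1 : (1:Int) + ((k-1 : Nat) : Int) = (k : Int) := by omega
    rw [h1, hdn, hF]
    simp only [Int.gcd_natCast_natCast, Nat.cast_eq_one]
  unfold phiB
  rw [PySem.List.pyRange_one, List.map_map, sum_map_range_eq]
  have hm : (d + 1 - 1).toNat = n := by omega
  rw [hm]
  have hstep : ∀ j ∈ Finset.range n,
      ((fun k : Int => if (Int.gcd k d : Int) = 1 then (1:Int) else 0) ∘ fun k : Nat => (1:Int) + k) j = F (j+1) := by
    intro j _
    have := hconv (j+1) (by omega)
    simpa using this
  rw [Finset.sum_congr rfl hstep]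
  have hF0 : F 0 = F n := by
    rw [hF]; simp only [Nat.gcd_zero_left, Nat.gcd_self]
  have h1 : (∑ j ∈ Finset.range n, F (j+1)) + F 0 = (∑ j ∈ Finset.range n, F j) + F n := by
    rw [← Finset.sum_range_succ' F n, Finset.sum_range_succ F n]
  have h2 : (∑ j ∈ Finset.range n, F (j+1)) = ∑ j ∈ Finset.range n, F j := by omega
  rw [h2]
  -- now the standard totient count
  have : ∑ j ∈ Finset.range n, F j = ((Finset.range n).filter n.Coprime).card := by
    rw [Finset.card_filter]
    push_cast
    apply Finset.sum_congr rfl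
    intro j _
    simp [hF, Nat.Coprime, Nat.gcd_comm j n]
  rw [this, hn, Nat.totient]

lemma crossB_eq (r c : List Int) (m : Int) :
    crossB r c ((PySem.List.pyRange 1 (m + 1) 1).map (fun d => (d, phiB d))) = Em (↑r) (↑c) m := by
  unfold crossB Em
  rw [List.map_map]
  apply congrArg
  apply List.map_congr_left
  intro d hd
  have hd1 : 1 ≤ d := by
    rw [PySem.List.mem_pyRange_one] at hd; omega
  simp only [Function.comp_apply]
  rw [phiB_eq d hd1,
      sum_ite_count r (fun a => PySem.Int.mod a d = 0),
      sum_ite_count c (fun b => PySem.Int.mod b d = 0)]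
  rfl

lemma msProd_pos (S : Multiset Int) (h : ∀ a ∈ S, 1 ≤ a) : 0 < msProd S := by
  apply Finset.prod_pos
  intro a ha
  have h1 : 1 ≤ a := h a (Multiset.mem_toFinset.mp ha)
  exact mul_pos (pow_pos (by omega) _) (by exact_mod_cast Nat.factorial_pos _)

lemma fdiv_fdiv (res X Y : Int) (hX : 0 < X) (hY : 0 < Y) :
    PySem.Int.floordiv (PySem.Int.floordiv res X) Y = PySem.Int.floordiv res (X * Y) := by
  rw [PySem.Int.floordiv_eq_ediv_of_pos hX, PySem.Int.floordiv_eq_ediv_of_pos hY,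
      PySem.Int.floordiv_eq_ediv_of_pos (mul_pos hX hY)]
  exact Int.ediv_ediv_of_nonneg hX.le

-- a sorted-descending list whose elements are all ≤ a splits off its run of a's
lemma count_head_split : ∀ (t : List Int) (a : Int), t.Pairwise (fun x y => y ≤ x) →
    (∀ z ∈ t, z ≤ a) → ∃ q, t = List.replicate (t.count a) a ++ q ∧ a ∉ q ∧
      q.Pairwise (fun x y => y ≤ x) ∧ (∀ z ∈ q, z ∈ t) := by
  intro t
  induction t with
  | nil => intro a _ _; exact ⟨[], by simp, by simp, by simp, by simp⟩
  | cons b t' ih =>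
    intro a hp hle
    rcases List.pairwise_cons.mp hp with ⟨hb, hp'⟩
    by_cases hba : b = a
    · subst hba
      rcases ih b hp' (fun z hz => hb z hz) with ⟨q, hq, haq, hqp, hqm⟩
      refine ⟨q, ?_, haq, hqp, fun z hz => List.mem_cons_of_mem _ (hqm z hz)⟩
      rw [List.count_cons_self, List.replicate_succ, List.cons_append]
      congr 1
    · have hba' : b < a := lt_of_le_of_ne (hle b List.mem_cons_self) hba
      have hnot : a ∉ b :: t' := by
        intro hmem
        rcases List.mem_cons.mp hmem with rfl | hmem'
        · omega
        · have := hb a hmem'; omega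
      have hc : (b :: t').count a = 0 := List.count_eq_zero.mpr hnot
      exact ⟨b :: t', by simp [hc], hnot, hp, fun z hz => hz⟩

lemma msProd_split (a : Int) (c : Nat) (q : List Int) (hc : 0 < c) (haq : a ∉ q) :
    msProd (↑(List.replicate c a ++ q)) = (a ^ c * (c.factorial : Int)) * msProd (↑q) := by
  unfold msProd
  have hco : ∀ x : Int, (↑(List.replicate c a ++ q) : Multiset Int).count x
      = (if x = a then c else 0) + (↑q : Multiset Int).count x := by
    intro x
    simp only [Multiset.coe_count, List.count_append]
    by_cases h : x = a
    · subst h; simp [List.count_replicate, beq_iff_eq]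
    · simp [List.count_replicate, beq_iff_eq, h, Ne.symm h]
  have htf : (↑(List.replicate c a ++ q) : Multiset Int).toFinset
      = insert a (↑q : Multiset Int).toFinset := by
    apply Finset.ext; intro x
    simp only [Multiset.mem_toFinset, Multiset.mem_coe, List.mem_append,
      List.mem_replicate, Finset.mem_insert]
    constructor
    · rintro (⟨_, rfl⟩ | hx)
      · exact Or.inl rfl
      · exact Or.inr hx
    · rintro (rfl | hx)
      · exact Or.inl ⟨by omega, rfl⟩
      · exact Or.inr hx
  have hna : a ∉ (↑q : Multiset Int).toFinset := by
    simpa [Multiset.mem_toFinset] using haq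
  rw [htf, Finset.prod_insert hna]
  have h1 : (↑(List.replicate c a ++ q) : Multiset Int).count a = c := by
    rw [hco]; simp [List.count_eq_zero.mpr haq, Multiset.coe_count]
  rw [h1]
  congr 1
  apply Finset.prod_congr rfl
  intro x hx
  have hxa : x ≠ a := by rintro rfl; exact hna hx
  rw [hco x, if_neg hxa, zero_add]

lemma classAux_eq : ∀ (f : Nat) (p : List Int) (res : Int), p.length ≤ f →
    p.Pairwise (fun x y => y ≤ x) → (∀ a ∈ p, 1 ≤ a) →
    classSizeAux f p res = PySem.Int.floordiv res (msProd (↑p)) := by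
  intro f
  induction f with
  | zero =>
    intro p res hlen _ _
    have hp : p = [] := List.length_eq_zero_iff.mp (by omega)
    subst hp
    show res = PySem.Int.floordiv res (msProd 0)
    unfold msProd
    simp [PySem.Int.floordiv, Int.fdiv_one]
  | succ f ih =>
    intro p res hlen hpw hpos
    cases p with
    | nil =>
      show res = PySem.Int.floordiv res (msProd 0)
      unfold msProd
      simp [PySem.Int.floordiv, Int.fdiv_one]
    | cons a t =>
      rcases List.pairwise_cons.mp hpw with ⟨hta, htp⟩
      rcases count_head_split t a htp hta with ⟨q, hq, haq, hqp, hqm⟩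
      have hc : (a :: t).count a = t.count a + 1 := by
        rw [List.count_cons_self]
      have hsplit : a :: t = List.replicate ((a :: t).count a) a ++ q := by
        rw [hc, List.replicate_succ, List.cons_append]
        congr 1
      set c : Nat := (a :: t).count a with hcc
      have hcpos : 0 < c := by omega
      have hdrop : PySem.List.slice (a :: t) (some (c : Int)) none = q := by
        rw [PySem.List.slice_from_natCast, hsplit]
        have h1 : List.drop (List.replicate c a).length (List.replicate c a ++ q) = q :=
          List.drop_left
        simpa using h1
      show classSizeAux f (PySem.List.slice (a :: t) (some (c : Int)) none)
          (PySem.Int.floordiv res (a ^ c * (c.factorial : Int)))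
        = PySem.Int.floordiv res (msProd (↑(a :: t)))
      rw [hdrop]
      have hq1 : ∀ z ∈ q, 1 ≤ z := fun z hz => hpos z (List.mem_cons_of_mem _ (hqm z hz))
      have hqlen : q.length ≤ f := by
        have h1 : c + q.length = t.length + 1 := by
          have := congrArg List.length hsplit
          simp at this
          omega
        have h2 : t.length + 1 ≤ f + 1 := by simpa using hlen
        omega
      rw [ih q _ hqlen hqp hq1]
      rw [fdiv_fdiv _ _ _
        (mul_pos (pow_pos (by have := hpos a List.mem_cons_self; omega) _)
          (by exact_mod_cast Nat.factorial_pos _))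
        (msProd_pos _ (by intro z hz; exact hq1 z (by exact_mod_cast hz)))]
      congr 1
      have : (↑(a :: t) : Multiset Int) = ↑(List.replicate c a ++ q) := by
        rw [← hsplit]
      rw [this, msProd_split a c q hcpos haq]

lemma classSize_eq (p : List Int) (n : Int)
    (hs : p.Pairwise (fun x y : Int => y ≤ x)) (hp : ∀ a ∈ p, 1 ≤ a) :
    classSize p n = Gm (↑p) n :=
  classAux_eq p.length p _ le_rfl hs hp

lemma len_le_sum (l : List Int) (h : ∀ a ∈ l, 1 ≤ a) : (l.length : Int) ≤ l.sum := by
  induction l with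
  | nil => simp
  | cons a t ih =>
    have h1 := h a List.mem_cons_self
    have h2 := ih (fun z hz => h z (List.mem_cons_of_mem _ hz))
    simp only [List.length_cons, List.sum_cons]
    push_cast
    omega

lemma mem_rangeA {x n k : Int} :
    k ∈ PySem.List.pyRange x (PySem.Int.floordiv n 2 + 1) 1 ↔ x ≤ k ∧ 2 * k ≤ n := by
  rw [PySem.List.mem_pyRange_one]
  constructor
  · rintro ⟨h1, h2⟩
    have h3 : k ≤ PySem.Int.floordiv n 2 := by omega
    rw [PySem.Int.le_floordiv_iff_mul_le (by norm_num)] at h3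
    exact ⟨h1, by omega⟩
  · rintro ⟨h1, h2⟩
    refine ⟨h1, ?_⟩
    have h3 : k ≤ PySem.Int.floordiv n 2 := by
      rw [PySem.Int.le_floordiv_iff_mul_le (by norm_num)]; omega
    omega

lemma partsA_ne : ∀ (f : Nat) (n x : Int), ∀ l ∈ partitionA f n x, l ≠ [] := by
  intro f
  induction f with
  | zero => intro n x l hl; simp [partitionA] at hl; subst hl; simp
  | succ f ih =>
    intro n x l hl
    simp only [partitionA, List.mem_cons, List.mem_flatMap, List.mem_map] at hl
    rcases hl with rfl | ⟨k, _, y, _, rfl⟩ <;> simp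

lemma partsA_sum : ∀ (f : Nat) (n x : Int), ∀ l ∈ partitionA f n x, l.sum = n := by
  intro f
  induction f with
  | zero => intro n x l hl; simp [partitionA] at hl; subst hl; simp
  | succ f ih =>
    intro n x l hl
    simp only [partitionA, List.mem_cons, List.mem_flatMap, List.mem_map] at hl
    rcases hl with rfl | ⟨k, hk, y, hy, rfl⟩
    · simp
    · have := ih (n - k) k y hy
      simp [this]

lemma partsA_ge : ∀ (f : Nat) (n x : Int), 1 ≤ x → x ≤ n →
    ∀ l ∈ partitionA f n x, ∀ a ∈ l, x ≤ a := by
  intro f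
  induction f with
  | zero =>
    intro n x hx hxn l hl a ha
    simp [partitionA] at hl; subst hl
    simp at ha; omega
  | succ f ih =>
    intro n x hx hxn l hl a ha
    simp only [partitionA, List.mem_cons, List.mem_flatMap, List.mem_map] at hl
    rcases hl with rfl | ⟨k, hk, y, hy, rfl⟩
    · simp at ha; omega
    · rw [mem_rangeA] at hk
      rcases List.mem_cons.mp ha with rfl | ha'
      · omega
      · have := ih (n - k) k (by omega) (by omega) y hy a ha'
        omega

lemma partsA_complete : ∀ (f : Nat) (l : List Int) (n x : Int), l ≠ [] →
    l.Pairwise (· ≤ ·) → (∀ a ∈ l, x ≤ a) → (∀ a ∈ l, 1 ≤ a) → l.sum = n → l.length ≤ f →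
    l ∈ partitionA f n x := by
  intro f
  induction f with
  | zero =>
    intro l n x hne _ _ _ _ hlen
    rcases l with _ | ⟨a, t⟩
    · exact absurd rfl hne
    · simp at hlen
  | succ f ih =>
    intro l n x hne hpw hge h1 hsum hlen
    rcases l with _ | ⟨a, t⟩
    · exact absurd rfl hne
    rcases t with _ | ⟨b, t'⟩
    · simp at hsum; subst hsum
      simp [partitionA]
    · simp only [partitionA, List.mem_cons, List.mem_flatMap, List.mem_map]
      right
      refine ⟨a, ?_, b :: t', ?_, rfl⟩
      · rw [mem_rangeA]
        rcases List.pairwise_cons.mp hpw with ⟨hab, _⟩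
        have hb : a ≤ b := hab b List.mem_cons_self
        have ht0 : (0:Int) ≤ t'.sum := by
          have hl := len_le_sum t' (fun z hz => h1 z (by simp [hz]))
          have : (0:Int) ≤ (t'.length : Int) := by positivity
          omega
        have hsum' : a + (b + t'.sum) = n := by simpa using hsum
        exact ⟨hge a List.mem_cons_self, by omega⟩
      · exact ih (b :: t') (n - a) a (by simp) (List.Pairwise.of_cons hpw)
          (fun z hz => (List.pairwise_cons.mp hpw).1 z hz)
          (fun z hz => h1 z (List.mem_cons_of_mem _ hz))
          (by simp at hsum ⊢; omega)
          (by simpa using hlen)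

lemma partsA_nodup : ∀ (f : Nat) (n x : Int), 1 ≤ x →
    ((partitionA f n x).map toMS).Nodup := by
  intro f
  induction f with
  | zero => intro n x _; simp [partitionA]
  | succ f ih =>
    intro n x hx
    simp only [partitionA]
    rw [List.map_cons, List.map_flatMap, List.nodup_cons]
    constructor
    · -- ↑[n] has card 1, every flatMap element has card ≥ 2
      intro hmem
      rw [List.mem_flatMap] at hmem
      rcases hmem with ⟨k, hk, hS⟩
      rw [List.map_map, List.mem_map] at hS
      rcases hS with ⟨y, hy, hEq⟩
      have hyne := partsA_ne f (n - k) k y hy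
      have hcard := congrArg Multiset.card hEq
      simp only [toMS, Function.comp_apply, Multiset.coe_card, List.length_cons] at hcard
      rcases y with _ | ⟨z, y'⟩
      · exact hyne rfl
      · simp at hcard
    · rw [List.nodup_flatMap]
      constructor
      · intro k hk
        rw [mem_rangeA] at hk
        rw [List.map_map]
        have hinj : Function.Injective (fun S : Multiset Int => k ::ₘ S) := by
          intro S T h
          exact (Multiset.cons_inj_right k).mp h
        rw [show (toMS ∘ (fun y => k :: y))
            = (fun S : Multiset Int => k ::ₘ S) ∘ toMS from by
          funext l; simp [toMS, Multiset.cons_coe]]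
        rw [← List.map_map]
        exact (ih (n - k) k (by omega)).map hinj
      · -- distinct k give disjoint images
        have hpw : (PySem.List.pyRange x (PySem.Int.floordiv n 2 + 1) 1).Pairwise (· ≠ ·) :=
          (PySem.List.nodup_pyRange_one _ _)
        apply hpw.imp_of_mem
        intro k k' hkm hkm' hne
        rw [Function.onFun]
        intro S hS hS'
        rw [List.map_map, List.mem_map] at hS hS'
        rcases hS with ⟨y, hy, rfl⟩
        rcases hS' with ⟨y', hy', hEq⟩
        rw [mem_rangeA] at hkm hkm'
        have hky : ∀ a ∈ y, k ≤ a :=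
          partsA_ge f (n - k) k (by omega) (by omega) y hy
        have hky' : ∀ a ∈ y', k' ≤ a :=
          partsA_ge f (n - k') k' (by omega) (by omega) y' hy'
        simp only [Function.comp_apply] at hEq
        -- k' ∈ k ::ₘ ↑y and k ∈ k' ::ₘ ↑y'
        have h1 : k' ∈ toMS (k :: y) := by
          rw [← hEq]; simp [toMS]
        have h2 : k ∈ toMS (k' :: y') := by rw [hEq]; simp [toMS]
        simp only [toMS, Multiset.mem_coe, List.mem_cons] at h1 h2
        rcases h1 with rfl | h1
        · exact hne rfl
        · rcases h2 with rfl | h2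
          · exact hne rfl
          · have := hky k' h1
            have := hky' k h2
            omega

lemma partsB_sound : ∀ (f : Nat) (n m : Int),
    ∀ l ∈ partsDesc f n m,
      (∀ a ∈ l, 1 ≤ a ∧ a ≤ m) ∧ l.sum = n ∧ l.Pairwise (fun x y : Int => y ≤ x) := by
  intro f
  induction f with
  | zero =>
    intro n m l hl
    by_cases hn : n = 0
    · simp [partsDesc, hn] at hl
      subst hl; simp [hn]
    · simp [partsDesc, hn] at hl
  | succ f ih =>
    intro n m l hl
    by_cases hn : n = 0
    · simp [partsDesc, hn] at hl
      subst hl; simp [hn]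
    · simp only [partsDesc, hn, if_false, List.mem_flatMap, List.mem_map] at hl
      rcases hl with ⟨k, hk, rest, hrest, rfl⟩
      rw [PySem.List.mem_pyRange_neg_one] at hk
      rcases ih (n - k) k rest hrest with ⟨hb, hsum, hpw⟩
      refine ⟨?_, by simp [hsum], ?_⟩
      · intro a ha
        rcases List.mem_cons.mp ha with rfl | ha'
        · omega
        · have := hb a ha'; omega
      · rw [List.pairwise_cons]
        exact ⟨fun z hz => (hb z hz).2, hpw⟩

lemma partsB_complete : ∀ (f : Nat) (l : List Int) (n m : Int),
    l.Pairwise (fun x y : Int => y ≤ x) → (∀ a ∈ l, 1 ≤ a ∧ a ≤ m) → l.sum = n →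
    l.length ≤ f → l ∈ partsDesc f n m := by
  intro f
  induction f with
  | zero =>
    intro l n m _ hb hsum hlen
    have hl : l = [] := List.length_eq_zero_iff.mp (by omega)
    subst hl
    simp at hsum
    simp [partsDesc, ← hsum]
  | succ f ih =>
    intro l n m hpw hb hsum hlen
    rcases l with _ | ⟨a, t⟩
    · simp at hsum
      simp [partsDesc, ← hsum]
    · have ha := hb a List.mem_cons_self
      have htsum : (0:Int) ≤ t.sum := by
        have h1 := len_le_sum t (fun z hz => (hb z (List.mem_cons_of_mem _ hz)).1)
        have : (0:Int) ≤ (t.length : Int) := by positivity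
        omega
      have hn : n ≠ 0 := by
        simp only [List.sum_cons] at hsum
        omega
      simp only [partsDesc, hn, if_false, List.mem_flatMap, List.mem_map]
      refine ⟨a, ?_, t, ?_, rfl⟩
      · rw [PySem.List.mem_pyRange_neg_one]
        simp only [List.sum_cons] at hsum
        constructor
        · omega
        · simp only [le_min_iff]
          exact ⟨by omega, ha.2⟩
      · exact ih t (n - a) a (List.Pairwise.of_cons hpw)
          (fun z hz => ⟨(hb z (List.mem_cons_of_mem _ hz)).1,
            (List.pairwise_cons.mp hpw).1 z hz⟩)
          (by simp at hsum ⊢; omega)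
          (by simpa using hlen)

lemma partsB_nodup : ∀ (f : Nat) (n m : Int),
    ((partsDesc f n m).map toMS).Nodup := by
  intro f
  induction f with
  | zero =>
    intro n m
    by_cases hn : n = 0 <;> simp [partsDesc, hn]
  | succ f ih =>
    intro n m
    by_cases hn : n = 0
    · simp [partsDesc, hn]
    · simp only [partsDesc, hn, if_false]
      rw [List.map_flatMap, List.nodup_flatMap]
      constructor
      · intro k hk
        rw [List.map_map]
        have hinj : Function.Injective (fun S : Multiset Int => k ::ₘ S) := by
          intro S T h
          exact (Multiset.cons_inj_right k).mp h
        rw [show (toMS ∘ (fun rest => k :: rest))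
            = (fun S : Multiset Int => k ::ₘ S) ∘ toMS from by
          funext l; simp [toMS, Multiset.cons_coe]]
        rw [← List.map_map]
        exact (ih (n - k) k).map hinj
      · have hnd : (PySem.List.pyRange (min n m) 0 (-1)).Pairwise (· ≠ ·) := by
          rw [PySem.List.pyRange_neg_one_eq_reverse]
          exact (List.nodup_reverse.mpr (PySem.List.nodup_pyRange_one _ _))
        apply hnd.imp_of_mem
        intro k k' hkm hkm' hne
        rw [Function.onFun]
        intro S hS hS'
        rw [List.map_map, List.mem_map] at hS hS'
        rcases hS with ⟨y, hy, rfl⟩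
        rcases hS' with ⟨y', hy', hEq⟩
        have hky : ∀ a ∈ y, a ≤ k := fun a ha => ((partsB_sound f (n - k) k y hy).1 a ha).2
        have hky' : ∀ a ∈ y', a ≤ k' := fun a ha => ((partsB_sound f (n - k') k' y' hy').1 a ha).2
        simp only [Function.comp_apply] at hEq
        have h1 : k' ∈ toMS (k :: y) := by
          rw [← hEq]; simp [toMS]
        have h2 : k ∈ toMS (k' :: y') := by rw [hEq]; simp [toMS]
        simp only [toMS, Multiset.mem_coe, List.mem_cons] at h1 h2
        rcases h1 with rfl | h1
        · exact hne rfl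
        · rcases h2 with rfl | h2
          · exact hne rfl
          · have := hky k' h1
            have := hky' k h2
            omega

lemma parts_perm (n : Int) (hn : 1 ≤ n) :
    ((partitionA (n.toNat + 1) n 1).map toMS).Perm ((partsDesc (n.toNat + 1) n n).map toMS) := by
  rw [List.perm_ext_iff_of_nodup (partsA_nodup _ n 1 le_rfl) (partsB_nodup _ n n)]
  intro S
  constructor
  · intro hS
    rcases List.mem_map.mp hS with ⟨l, hl, rfl⟩
    have hsum : l.sum = n := partsA_sum _ n 1 l hl
    have hge : ∀ a ∈ l, 1 ≤ a := partsA_ge _ n 1 le_rfl hn l hl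
    -- the descending list of the same multiset
    set l' : List Int := ((toMS l).sort (· ≤ ·)).reverse with hl'
    have hmem : ∀ a, a ∈ l' ↔ a ∈ l := by
      intro a
      rw [hl', List.mem_reverse, Multiset.mem_sort]
      exact Multiset.mem_coe
    have hsum' : l'.sum = n := by
      rw [hl', List.sum_reverse]
      have h1 : (toMS l).sum = l.sum := Multiset.sum_coe l
      have h2 : (((toMS l).sort (· ≤ ·) : List Int) : Multiset Int).sum
          = (toMS l).sum := by rw [Multiset.sort_eq]
      rw [Multiset.sum_coe] at h2
      omega
    have hlen : l'.length = l.length := by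
      rw [hl', List.length_reverse, Multiset.length_sort, toMS, Multiset.coe_card]
    have hcoe : toMS l' = toMS l := by
      rw [hl', toMS, toMS, ← Multiset.coe_reverse, List.reverse_reverse, Multiset.sort_eq]
    rw [List.mem_map]
    refine ⟨l', ?_, hcoe⟩
    apply partsB_complete
    · rw [hl']
      rw [List.pairwise_reverse]
      exact Multiset.sort_sorted _ _
    · intro a ha
      have ha' := (hmem a).mp ha
      refine ⟨hge a ha', ?_⟩
      have : a ≤ l.sum := by
        have h0 : ∀ x ∈ toMS l, (0:Int) ≤ x := fun x hx => by
          have := hge x (Multiset.mem_coe.mp hx); omega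
        have h3 := Multiset.single_le_sum h0 a (Multiset.mem_coe.mpr ha')
        rw [toMS, Multiset.sum_coe] at h3
        exact h3
      omega
    · exact hsum'
    · have := len_le_sum l hge
      omega
  · intro hS
    rcases List.mem_map.mp hS with ⟨l, hl, rfl⟩
    rcases partsB_sound _ n n l hl with ⟨hb, hsum, _⟩
    set l' : List Int := (toMS l).sort (· ≤ ·) with hl'
    have hmem : ∀ a, a ∈ l' ↔ a ∈ l := by
      intro a
      rw [hl', Multiset.mem_sort]
      exact Multiset.mem_coe
    have hsum' : l'.sum = n := by
      have h2 : ((l' : List Int) : Multiset Int).sum = (toMS l).sum := by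
        rw [hl', Multiset.sort_eq]
      rw [Multiset.sum_coe, toMS, Multiset.sum_coe] at h2
      omega
    have hcoe : toMS l' = toMS l := by
      rw [hl', toMS, Multiset.sort_eq]
    have hne : l' ≠ [] := by
      intro h0
      rw [h0] at hsum'
      simp at hsum'
      omega
    rw [List.mem_map]
    refine ⟨l', ?_, hcoe⟩
    apply partsA_complete _ _ _ _ hne
    · exact Multiset.sort_sorted _ _
    · intro a ha
      exact (hb a ((hmem a).mp ha)).1
    · intro a ha
      exact (hb a ((hmem a).mp ha)).1
    · exact hsum'
    · have := len_le_sum l' (fun a ha => (hb a ((hmem a).mp ha)).1)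
      omega

lemma mem_le_sum (l : List Int) (h : ∀ b ∈ l, 0 ≤ b) : ∀ a ∈ l, a ≤ l.sum := by
  induction l with
  | nil => simp
  | cons b t ih =>
    intro a ha
    have hb := h b List.mem_cons_self
    have hts : (0:Int) ≤ t.sum :=
      List.sum_nonneg (fun x hx => h x (List.mem_cons_of_mem _ hx))
    rcases List.mem_cons.mp ha with rfl | ha'
    · simp; omega
    · have := ih (fun x hx => h x (List.mem_cons_of_mem _ hx)) a ha'
      simp
      omega

-- double fold to double sum
lemma foldl2_sum (L M : List (List Int)) (t : List Int → List Int → Int) :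
    L.foldl (fun res r => M.foldl (fun res c => res + t r c) res) 0
      = (L.map (fun r => (M.map (t r)).sum)).sum := by
  rw [PySem.List.foldl_congr_mem L _ (fun res r => res + (M.map (t r)).sum) 0
    (by intro acc r _; exact PySem.List.foldl_add M _ acc)]
  rw [PySem.List.foldl_add]
  norm_num

lemma solution_eq_alt (w h_ s : Int) (hw : 1 ≤ w) (hh : 1 ≤ h_) :
    solution w h_ s = solution_alt w h_ s := by
  unfold solution solution_alt
  simp only []
  congr 1
  congr 1
  rw [foldl2_sum, foldl2_sum]
  -- A side to Fm over multisets
  have hAterm : ∀ r ∈ partitionA (w.toNat + 1) w 1, ∀ c ∈ partitionA (h_.toNat + 1) h_ 1,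
      conjugateA r w * conjugateA c h_ * s ^ (expsumA r c).toNat = Fm w h_ s (toMS r) (toMS c) := by
    intro r hr c hc
    have hr1 : ∀ a ∈ r, 1 ≤ a := partsA_ge _ w 1 le_rfl hw r hr
    have hc1 : ∀ a ∈ c, 1 ≤ a := partsA_ge _ h_ 1 le_rfl hh c hc
    have hrs := partsA_sum _ w 1 r hr
    have hcs := partsA_sum _ h_ 1 c hc
    have hrb : ∀ a ∈ r, 1 ≤ a ∧ a ≤ w := by
      intro a ha
      refine ⟨hr1 a ha, ?_⟩
      have := mem_le_sum r (fun b hb => by have := hr1 b hb; omega) a ha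
      omega
    have hcb : ∀ a ∈ c, 1 ≤ a ∧ a ≤ h_ := by
      intro a ha
      refine ⟨hc1 a ha, ?_⟩
      have := mem_le_sum c (fun b hb => by have := hc1 b hb; omega) a ha
      omega
    rw [conjA_eq r w hr1, conjA_eq c h_ hc1, expsumA_eq r c w h_ hrb hcb]
    rfl
  have hBterm : ∀ r ∈ partsDesc (w.toNat + 1) w w, ∀ c ∈ partsDesc (h_.toNat + 1) h_ h_,
      classSize r w * classSize c h_ *
        s ^ (crossB r c ((PySem.List.pyRange 1 (min w h_ + 1) 1).map (fun d => (d, phiB d)))).toNat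
      = Fm w h_ s (toMS r) (toMS c) := by
    intro r hr c hc
    rcases partsB_sound _ w w r hr with ⟨hrb, _, hrp⟩
    rcases partsB_sound _ h_ h_ c hc with ⟨hcb, _, hcp⟩
    rw [classSize_eq r w hrp (fun a ha => (hrb a ha).1),
        classSize_eq c h_ hcp (fun a ha => (hcb a ha).1),
        crossB_eq r c (min w h_)]
    rfl
  -- lift to multiset lists
  have hstepA : (List.map (fun r => ((partitionA (h_.toNat + 1) h_ 1).map
        (fun c => conjugateA r w * conjugateA c h_ * s ^ (expsumA r c).toNat)).sum)
        (partitionA (w.toNat + 1) w 1)).sum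
      = ((List.map toMS (partitionA (w.toNat + 1) w 1)).map
          (fun S => ((List.map toMS (partitionA (h_.toNat + 1) h_ 1)).map
            (fun T => Fm w h_ s S T)).sum)).sum := by
    rw [List.map_map]
    apply congrArg
    apply List.map_congr_left
    intro r hr
    simp only [Function.comp_apply]
    rw [List.map_map]
    apply congrArg
    apply List.map_congr_left
    intro c hc
    exact hAterm r hr c hc
  have hstepB : (List.map (fun r => ((partsDesc (h_.toNat + 1) h_ h_).map
        (fun c => classSize r w * classSize c h_ *
          s ^ (crossB r c ((PySem.List.pyRange 1 (min w h_ + 1) 1).map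
            (fun d => (d, phiB d)))).toNat)).sum)
        (partsDesc (w.toNat + 1) w w)).sum
      = ((List.map toMS (partsDesc (w.toNat + 1) w w)).map
          (fun S => ((List.map toMS (partsDesc (h_.toNat + 1) h_ h_)).map
            (fun T => Fm w h_ s S T)).sum)).sum := by
    rw [List.map_map]
    apply congrArg
    apply List.map_congr_left
    intro r hr
    simp only [Function.comp_apply]
    rw [List.map_map]
    apply congrArg
    apply List.map_congr_left
    intro c hc
    exact hBterm r hr c hc
  rw [hstepA, hstepB]
  -- inner lists agree by the h-permutation, then outer by the w-permutation
  have hinner : (fun S => ((List.map toMS (partitionA (h_.toNat + 1) h_ 1)).map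
        (fun T => Fm w h_ s S T)).sum)
      = (fun S => ((List.map toMS (partsDesc (h_.toNat + 1) h_ h_)).map
        (fun T => Fm w h_ s S T)).sum) := by
    funext S
    exact ((parts_perm h_ hh).map (fun T => Fm w h_ s S T)).sum_eq
  rw [hinner]
  exact ((parts_perm w hw).map _).sum_eq

-- ===== VERDICT (by name: the statements are the Claim_ definitions above) =====
theorem solution_spec : Claim_equal_solution := by
  intro w h_ s _hdom hpre
  rcases hpre with ⟨hw, hh⟩
  show solution w h_ s = solution_alt w h_ s
  exact solution_eq_alt w h_ s hw hh
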